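-- pv_equiv track=rewrite | github.com/Mirror-fish/MEGA-xTEA | megaxtea/polyA_detector.py | max_consecutive_A_or_T
-- ===== SOURCE A (Python) =====
-- from typing import Dict, List, Optional, Set, Tuple
--
-- def max_consecutive_A_or_T(seq: str) -> Tuple[int, int]:
--     """Return (max_consecutive_A, max_consecutive_T) in *seq*."""
--     max_a = max_t = cur_a = cur_t = 0
--     for ch in seq.upper():
--         if ch == "A":
--             cur_a += 1
--         else:
--             max_a = max(max_a, cur_a)
--             cur_a = 0
--         if ch == "T":
--             cur_t += 1
--         else:
--             max_t = max(max_t, cur_t)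
--             cur_t = 0
--     return max(max_a, cur_a), max(max_t, cur_t)
-- ===== SOURCE B (Python) =====
-- def max_consecutive_A_or_T(seq):
--     """Return (max_consecutive_A, max_consecutive_T) in *seq*."""
--     s = seq.upper()
--     n = len(s)
--     max_a = max_t = 0
--     i = 0
--     while i < n:
--         j = i
--         while j < n and s[j] == s[i]:
--             j += 1
--         run = j - i
--         if s[i] == 'A':
--             max_a = max(max_a, run)
--         elif s[i] == 'T':
--             max_t = max(max_t, run)
--         i = j
--     return max_a, max_t
-- ===== Notes on version B (the rewrite author's own statement) =====
-- stated objective: alternative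
-- what changed: B iterates over maximal runs of identical characters (an explicit group-by scan over index pairs) and takes the max run length per base, instead of A's per-character loop that maintains and resets two running counters per character.
import Mathlib
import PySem

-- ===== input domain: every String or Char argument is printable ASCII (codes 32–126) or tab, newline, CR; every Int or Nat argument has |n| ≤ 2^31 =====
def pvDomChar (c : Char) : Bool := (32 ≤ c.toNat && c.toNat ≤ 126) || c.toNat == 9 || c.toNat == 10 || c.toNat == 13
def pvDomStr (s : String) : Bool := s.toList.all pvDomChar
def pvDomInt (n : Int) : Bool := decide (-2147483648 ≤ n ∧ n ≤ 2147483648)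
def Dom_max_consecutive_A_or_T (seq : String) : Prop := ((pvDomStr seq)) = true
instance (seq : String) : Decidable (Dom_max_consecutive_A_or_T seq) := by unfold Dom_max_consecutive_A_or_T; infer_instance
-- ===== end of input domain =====

-- B scans the string run by run (an explicit group-by) and takes the max run length per base,
-- instead of A's per-character loop with two running counters; alternative decomposition, same cost.

-- ===== PORT A =====
-- one iteration of A's for-loop: state (max_a, max_t, cur_a, cur_t), branches in A's order
def stepA (s : Int × Int × Int × Int) (ch : Char) : Int × Int × Int × Int :=
  let pa := if ch = 'A' then (s.1, s.2.2.1 + 1) else (max s.1 s.2.2.1, 0)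
  let pt := if ch = 'T' then (s.2.1, s.2.2.2 + 1) else (max s.2.1 s.2.2.2, 0)
  (pa.1, pt.1, pa.2, pt.2)

def max_consecutive_A_or_T (seq : String) : Int × Int :=
  let s := (PySem.Str.upper seq).toList.foldl stepA (0, 0, 0, 0)
  (max s.1 s.2.2.1, max s.2.1 s.2.2.2)

-- ===== PORT B =====
-- Source B's outer while-loop: take the maximal run at the front (the inner while), update the
-- matching maximum, continue after the run
def loopB : List Char → Int → Int → Int × Int
  | [], ma, mt => (ma, mt)
  | c :: cs, ma, mt =>
      let run : Int := 1 + (cs.takeWhile (· == c)).length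
      let rest := cs.dropWhile (· == c)
      if c = 'A' then loopB rest (max ma run) mt
      else if c = 'T' then loopB rest ma (max mt run)
      else loopB rest ma mt
termination_by l => l.length
decreasing_by all_goals (simp only [List.length_cons]; exact Nat.lt_succ_of_le (List.length_dropWhile_le _ _))

def max_consecutive_A_or_T_alt (seq : String) : Int × Int :=
  loopB (PySem.Str.upper seq).toList 0 0

-- ===== PRECONDITION & SPEC =====
def Spec_max_consecutive_A_or_T (seq : String) (out : Int × Int) : Prop := out = max_consecutive_A_or_T_alt seq
instance (seq : String) (out : Int × Int) : Decidable (Spec_max_consecutive_A_or_T seq out) := by unfold Spec_max_consecutive_A_or_T; infer_instance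

-- ===== CLAIM (what is proved, stated in full; the proofs are below) =====
def Claim_equal_max_consecutive_A_or_T : Prop := ∀ (seq : String), Dom_max_consecutive_A_or_T seq → Spec_max_consecutive_A_or_T seq (max_consecutive_A_or_T seq)

-- ===== LEMMAS AND PROOFS =====

-- A's closing 'max' pair applied to the final loop state
def finishA (s : Int × Int × Int × Int) : Int × Int := (max s.1 s.2.2.1, max s.2.1 s.2.2.2)

-- processing a block of 'A's adds its length to cur_a and leaves the rest of the state alone
theorem foldA_run_A (t : List Char) (ht : ∀ x ∈ t, x = 'A') (ma mt ca : Int) (hmt : 0 ≤ mt) :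
    t.foldl stepA (ma, mt, ca, 0) = (ma, mt, ca + t.length, 0) := by
  induction t generalizing ca with
  | nil => simp
  | cons c cs ih =>
      have hc : c = 'A' := ht c (by simp)
      have hstep : stepA (ma, mt, ca, 0) c = (ma, mt, ca + 1, 0) := by
        simp [stepA, hc, max_eq_left hmt]
      rw [List.foldl_cons, hstep, ih (fun x hx => ht x (by simp [hx])) (ca + 1)]
      simp [Prod.ext_iff]
      ring

-- processing a block of 'T's adds its length to cur_t and leaves the rest of the state alone
theorem foldA_run_T (t : List Char) (ht : ∀ x ∈ t, x = 'T') (ma mt ct : Int) (hma : 0 ≤ ma) :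
    t.foldl stepA (ma, mt, 0, ct) = (ma, mt, 0, ct + t.length) := by
  induction t generalizing ct with
  | nil => simp
  | cons c cs ih =>
      have hc : c = 'T' := ht c (by simp)
      have hstep : stepA (ma, mt, 0, ct) c = (ma, mt, 0, ct + 1) := by
        simp [stepA, hc, max_eq_left hma]
      rw [List.foldl_cons, hstep, ih (fun x hx => ht x (by simp [hx])) (ct + 1)]
      simp [Prod.ext_iff]
      ring

-- processing a block of characters that are neither 'A' nor 'T' leaves the state unchanged
theorem foldA_run_other (t : List Char) (c : Char) (ht : ∀ x ∈ t, x = c)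
    (hA : c ≠ 'A') (hT : c ≠ 'T') (ma mt : Int) (hma : 0 ≤ ma) (hmt : 0 ≤ mt) :
    t.foldl stepA (ma, mt, 0, 0) = (ma, mt, 0, 0) := by
  induction t with
  | nil => rfl
  | cons d ds ih =>
      have hd : d = c := ht d (by simp)
      have hstep : stepA (ma, mt, 0, 0) d = (ma, mt, 0, 0) := by
        simp [stepA, hd, hA, hT, max_eq_left hma, max_eq_left hmt]
      rw [List.foldl_cons, hstep, ih (fun x hx => ht x (by simp [hx]))]

theorem takeWhile_eq (c : Char) (cs : List Char) : ∀ x ∈ cs.takeWhile (· == c), x = c := by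
  intro x hx
  simpa using List.mem_takeWhile_imp hx

theorem dropWhile_head_ne (c : Char) (cs : List Char) (d : Char) (ds : List Char)
    (h : cs.dropWhile (· == c) = d :: ds) : d ≠ c := by
  have := List.head?_dropWhile_not (p := (· == c)) (l := cs)
  rw [h] at this
  simpa using this

-- after an 'A'-run of length k, folding the leftovers (which do not start with 'A')
-- is the same as folding from the clean state with max_a already updated
theorem resetA (rest : List Char) (hhead : ∀ d ds, rest = d :: ds → d ≠ 'A')
    (ma mt k : Int) (hmt : 0 ≤ mt) (hk : 0 ≤ k) :
    finishA (rest.foldl stepA (ma, mt, k, 0)) = finishA (rest.foldl stepA (max ma k, mt, 0, 0)) := by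
  match rest with
  | [] => simp [finishA, max_eq_left hmt, max_eq_left (le_max_right ma k |>.trans' hk)]
  | d :: ds =>
      have hd : d ≠ 'A' := hhead d ds rfl
      have hne : 0 ≤ max ma k := le_trans hk (le_max_right _ _)
      have hstep : stepA (ma, mt, k, 0) d = stepA (max ma k, mt, 0, 0) d := by
        simp [stepA, hd, max_eq_left hne]
      rw [List.foldl_cons, List.foldl_cons, hstep]

-- symmetric reset for a 'T'-run
theorem resetT (rest : List Char) (hhead : ∀ d ds, rest = d :: ds → d ≠ 'T')
    (ma mt k : Int) (hma : 0 ≤ ma) (hk : 0 ≤ k) :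
    finishA (rest.foldl stepA (ma, mt, 0, k)) = finishA (rest.foldl stepA (ma, max mt k, 0, 0)) := by
  match rest with
  | [] => simp [finishA, max_eq_left hma, max_eq_left (le_max_right mt k |>.trans' hk)]
  | d :: ds =>
      have hd : d ≠ 'T' := hhead d ds rfl
      have hne : 0 ≤ max mt k := le_trans hk (le_max_right _ _)
      have hstep : stepA (ma, mt, 0, k) d = stepA (ma, max mt k, 0, 0) d := by
        simp [stepA, hd, max_eq_left hne]
      rw [List.foldl_cons, List.foldl_cons, hstep]

-- main invariant: from a clean counter state, A's per-character fold agrees with B's run loop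
theorem mainA (n : Nat) : ∀ l : List Char, l.length ≤ n → ∀ ma mt : Int, 0 ≤ ma → 0 ≤ mt →
    finishA (l.foldl stepA (ma, mt, 0, 0)) = loopB l ma mt := by
  induction n with
  | zero =>
      intro l hl ma mt hma hmt
      have : l = [] := List.eq_nil_of_length_eq_zero (Nat.le_zero.mp hl)
      subst this
      rw [loopB]
      simp [finishA, max_eq_left hma, max_eq_left hmt]
  | succ n ih =>
      intro l hl ma mt hma hmt
      match l with
      | [] =>
          rw [loopB]
          simp [finishA, max_eq_left hma, max_eq_left hmt]
      | c :: cs =>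
        have hcs : cs.length ≤ n := by
          have := hl; simp [List.length_cons] at this; omega
        have hrest : (cs.dropWhile (· == c)).length ≤ n :=
          le_trans (List.length_dropWhile_le _ _) hcs
        have hwt : ∀ x ∈ cs.takeWhile (· == c), x = c := takeWhile_eq c cs
        have hfold : (c :: cs).foldl stepA (ma, mt, 0, 0)
            = (cs.dropWhile (· == c)).foldl stepA
                ((cs.takeWhile (· == c)).foldl stepA (stepA (ma, mt, 0, 0) c)) := by
          conv_lhs => rw [List.foldl_cons, ← List.takeWhile_append_dropWhile (p := (· == c)) (l := cs)]
          rw [List.foldl_append]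
        have hk : (0 : Int) ≤ 1 + (cs.takeWhile (· == c)).length := by positivity
        by_cases hA : c = 'A'
        · subst hA
          have hstep : stepA (ma, mt, 0, 0) 'A' = (ma, mt, 1, 0) := by
            simp [stepA, max_eq_left hmt]
          have hrun : (cs.takeWhile (· == 'A')).foldl stepA (ma, mt, 1, 0)
              = (ma, mt, (1 : Int) + (cs.takeWhile (· == 'A')).length, 0) := by
            rw [foldA_run_A _ hwt ma mt 1 hmt]
          have hmax : (0:Int) ≤ max ma (1 + (cs.takeWhile (· == 'A')).length) :=
            le_trans hk (le_max_right _ _)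
          rw [hfold, hstep, hrun,
            resetA _ (fun d ds h => dropWhile_head_ne 'A' cs d ds h) ma mt _ hmt hk,
            ih _ hrest _ mt hmax hmt]
          rw [loopB]
          simp
        · by_cases hT : c = 'T'
          · subst hT
            have hstep : stepA (ma, mt, 0, 0) 'T' = (ma, mt, 0, 1) := by
              simp [stepA, max_eq_left hma]
            have hrun : (cs.takeWhile (· == 'T')).foldl stepA (ma, mt, 0, 1)
                = (ma, mt, 0, (1 : Int) + (cs.takeWhile (· == 'T')).length) := by
              rw [foldA_run_T _ hwt ma mt 1 hma]
            have hmax : (0:Int) ≤ max mt (1 + (cs.takeWhile (· == 'T')).length) :=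
              le_trans hk (le_max_right _ _)
            rw [hfold, hstep, hrun,
              resetT _ (fun d ds h => dropWhile_head_ne 'T' cs d ds h) ma mt _ hma hk,
              ih _ hrest ma _ hma hmax]
            rw [loopB]
            simp
          · have hstep : stepA (ma, mt, 0, 0) c = (ma, mt, 0, 0) := by
              simp [stepA, hA, hT, max_eq_left hma, max_eq_left hmt]
            have hrun : (cs.takeWhile (· == c)).foldl stepA (ma, mt, 0, 0) = (ma, mt, 0, 0) :=
              foldA_run_other _ c hwt hA hT ma mt hma hmt
            rw [hfold, hstep, hrun, ih _ hrest ma mt hma hmt]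
            rw [loopB]
            simp [hA, hT]

-- ===== VERDICT (by name: the statement is the Claim_ definition above) =====
theorem max_consecutive_A_or_T_spec : Claim_equal_max_consecutive_A_or_T := by
  intro seq _
  unfold Spec_max_consecutive_A_or_T max_consecutive_A_or_T max_consecutive_A_or_T_alt
  exact mainA (PySem.Str.upper seq).toList.length _ le_rfl 0 0 le_rfl le_rfl
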